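-- pv_equiv track=rewrite | github.com/cxxxtxxyxx/Algorithm | 프로그래머스/unrated/138477. 명예의 전당 （1）/명예의 전당 （1）.py | solution
-- ===== SOURCE A (Python) =====
-- import heapq
--
-- def solution(k, score):
--     answer = []
--     _min = min(score[:k])
--     heap = []
--     for i in range(len(score)):
--         if i < k:
--             heapq.heappush(heap, score[i])
--             answer.append(heap[0])
--             continue
--
--         if heap[0] < score[i]:
--             heapq.heappop(heap)
--             heapq.heappush(heap, score[i])
--
--         answer.append(heap[0])
--
--     return answer
-- ===== SOURCE B (Python) =====
-- def solution(k, score):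
--     # Sorted-list "hall of fame": keep the k largest scores seen so far in
--     # ascending order; its first element is the published (k-th largest) score.
--     top = []
--     answer = []
--     for s in score:
--         lo, hi = 0, len(top)
--         while lo < hi:
--             mid = (lo + hi) // 2
--             if top[mid] < s:
--                 lo = mid + 1
--             else:
--                 hi = mid
--         top.insert(lo, s)
--         if len(top) > k:
--             top.pop(0)
--         answer.append(top[0])
--     return answer
-- ===== Notes on version B (the rewrite author's own statement) =====
-- stated objective: alternative
-- what changed: Replaces the binary heap (heapq push/pop/peek) by a sorted list maintained with hand-written binary-search insertion and trimmed to its k largest elements, answering with its first element each step.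
import Mathlib
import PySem

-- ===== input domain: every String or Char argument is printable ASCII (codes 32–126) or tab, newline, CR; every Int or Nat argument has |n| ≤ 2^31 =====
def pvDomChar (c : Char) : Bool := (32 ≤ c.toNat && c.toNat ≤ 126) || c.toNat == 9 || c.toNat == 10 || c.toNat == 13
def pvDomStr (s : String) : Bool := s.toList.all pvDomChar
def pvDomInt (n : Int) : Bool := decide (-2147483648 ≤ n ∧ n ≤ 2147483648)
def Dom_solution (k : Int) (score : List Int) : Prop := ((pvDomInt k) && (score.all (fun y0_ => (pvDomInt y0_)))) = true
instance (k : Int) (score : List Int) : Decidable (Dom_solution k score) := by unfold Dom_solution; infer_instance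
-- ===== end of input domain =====

-- B keeps the k largest scores in a sorted list (binary-search insert, trim, first element)
-- instead of A's binary min-heap; same return value on Pre_ (k ≥ 1, score ≠ []).

-- ===== PORT A =====
-- CPython heapq._siftdown(heap, 0, pos) with newitem = x held out of the list
-- (the list carries a hole at pos; all indices read are in range in heapq's usage).
def pySiftdown (l : List Int) (x : Int) (pos : Nat) : List Int :=
  if h : 0 < pos then
    let pp := (pos - 1) / 2
    let parent := l.getD pp 0
    if x < parent then pySiftdown (l.set pos parent) x pp
    else l.set pos x
  else l.set pos x
termination_by pos
decreasing_by omega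

-- CPython heapq._siftup's walk: move the smaller child up until pos has no child;
-- returns the updated list and the final hole position.
def pySiftupWalk (l : List Int) (pos : Nat) : List Int × Nat :=
  let c := 2 * pos + 1
  if h : c < l.length then
    let c := if c + 1 < l.length ∧ ¬ (l.getD c 0 < l.getD (c + 1) 0) then c + 1 else c
    pySiftupWalk (l.set pos (l.getD c 0)) c
  else (l, pos)
termination_by l.length - pos
decreasing_by simp only [List.length_set]; split <;> omega

def pyHeappush (l : List Int) (x : Int) : List Int :=
  pySiftdown (l ++ [x]) x l.length

-- heapq.heappop; A discards the popped value, so only the new heap is returned.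
def pyHeappop (l : List Int) : List Int :=
  let last := l.getLastD 0
  let rest := l.dropLast
  if rest.isEmpty then []
  else
    let w := pySiftupWalk (rest.set 0 last) 0
    pySiftdown w.1 last w.2

def solGo (k : Int) (score : List Int) (i : Nat) (heap ans : List Int) : List Int :=
  if _ : i < score.length then
    let s := score.getD i 0
    if (i : Int) < k then
      let heap' := pyHeappush heap s
      solGo k score (i + 1) heap' (ans ++ [heap'.getD 0 0])
    else
      let heap' := if heap.getD 0 0 < s then pyHeappush (pyHeappop heap) s else heap
      solGo k score (i + 1) heap' (ans ++ [heap'.getD 0 0])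
  else ans
termination_by score.length - i

def solution (k : Int) (score : List Int) : List Int :=
  -- `_min = min(score[:k])` raises on an empty slice; Pre_ admits exactly the
  -- inputs where A returns, so its value is irrelevant here.
  solGo k score 0 [] []

-- ===== PORT B =====
-- Source B's hand-written bisect_left loop.
def bsLeft (top : List Int) (s : Int) (lo hi : Nat) : Nat :=
  if _ : lo < hi then
    let mid := (lo + hi) / 2
    if top.getD mid 0 < s then bsLeft top s (mid + 1) hi
    else bsLeft top s lo mid
  else lo
termination_by hi - lo
decreasing_by all_goals omega

def altStep (k : Int) (st : List Int × List Int) (s : Int) : List Int × List Int :=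
  let top := st.1.insertIdx (bsLeft st.1 s 0 st.1.length) s
  let top := if (top.length : Int) > k then top.drop 1 else top
  (top, st.2 ++ [top.getD 0 0])

def solution_alt (k : Int) (score : List Int) : List Int :=
  (score.foldl (altStep k) ([], [])).2

-- ===== PRECONDITION & SPEC =====
-- Pre_ is exactly where A returns: for k ≤ 0 or score = [] the Python raises
-- (ValueError from min of an empty slice, or IndexError from heap[0]).
def Pre_solution (k : Int) (score : List Int) : Prop := 1 ≤ k ∧ score ≠ []
instance (k : Int) (score : List Int) : Decidable (Pre_solution k score) := by
  unfold Pre_solution; infer_instance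

def pvWitness_solution : Int × List Int := (2, [5, 3, 7, 3])

def Spec_solution (k : Int) (score : List Int) (out : List Int) : Prop := out = solution_alt k score
instance (k : Int) (score : List Int) (out : List Int) : Decidable (Spec_solution k score out) := by
  unfold Spec_solution; infer_instance

-- ===== CLAIM (what is proved, stated in full; the proofs are below) =====
def Claim_equal_solution : Prop := ∀ (k : Int) (score : List Int), Dom_solution k score → Pre_solution k score → Spec_solution k score (solution k score)


-- ===== LEMMAS AND PROOFS =====
def Edge (v : List Int) (i : Nat) : Prop := v.getD ((i - 1) / 2) 0 ≤ v.getD i 0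
def IsHeap (v : List Int) : Prop := ∀ i, 0 < i → i < v.length → Edge v i
def AUp (v : List Int) (pos : Nat) : Prop :=
  (∀ i, 0 < i → i < v.length → i ≠ pos → Edge v i) ∧
  (0 < pos → ∀ i, i < v.length → (i - 1) / 2 = pos → v.getD ((pos - 1) / 2) 0 ≤ v.getD i 0)

theorem getD_set' (l : List Int) (i j : Nat) (a : Int) :
    (l.set i a).getD j 0 = if i = j ∧ j < l.length then a else l.getD j 0 := by
  simp only [List.getD_eq_getElem?_getD, List.getElem?_set]
  split_ifs <;> simp_all

theorem siftdown_spec (pos : Nat) (l : List Int) (x : Int) (hpos : pos < l.length)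
    (hA : AUp (l.set pos x) pos) :
    (pySiftdown l x pos).Perm (l.set pos x) ∧ IsHeap (pySiftdown l x pos) := by
  induction pos using Nat.strong_induction_on generalizing l with
  | _ pos ih =>
  set n := l.length with hn
  set v := l.set pos x with hv
  have hvlen : v.length = n := by simp [hv, ← hn]
  have hvD : ∀ j, v.getD j 0 = if pos = j ∧ j < n then x else l.getD j 0 := fun j => getD_set' l pos j x
  rw [pySiftdown]
  by_cases h0 : 0 < pos
  · rw [dif_pos h0]
    set pp := (pos - 1) / 2 with hpp
    set parent := l.getD pp 0 with hparent
    have hpplt : pp < pos := by omega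
    by_cases hxp : x < parent
    · rw [if_pos hxp]
      set l' := l.set pos parent with hl'
      have hlen' : l'.length = n := by simp [hl', ← hn]
      set v' := l'.set pp x with hv'
      have hv'D : ∀ j, v'.getD j 0 = if j = pp then x else if j = pos then parent else v.getD j 0 := by
        intro j
        rw [hv', getD_set', hl', getD_set', hvD]
        simp only [List.length_set, ← hn]
        split_ifs <;> first | rfl | omega
      have hAup : AUp v' pp := by
        constructor
        · intro i hi0 hiv hne
          have hilen : i < n := by rw [hv'] at hiv; simp [hlen'] at hiv; omega
          unfold Edge
          rw [hv'D, hv'D]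
          by_cases hip : i = pos
          · subst hip
            have : (i - 1) / 2 = pp := by omega
            rw [if_pos this, if_neg hne, if_pos rfl]
            exact le_of_lt hxp
          · rw [if_neg hne, if_neg hip]
            by_cases hq1 : (i - 1) / 2 = pp
            · rw [if_pos hq1]
              have hE := hA.1 i hi0 (by omega) hip
              unfold Edge at hE
              rw [hq1] at hE
              have : v.getD pp 0 = parent := by rw [hvD]; rw [if_neg (by omega)]
              rw [this] at hE
              exact le_trans (le_of_lt hxp) hE
            · rw [if_neg hq1]
              by_cases hq2 : (i - 1) / 2 = pos
              · rw [if_pos hq2]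
                have := hA.2 h0 i (by omega) hq2
                have hppv : v.getD ((pos - 1) / 2) 0 = parent := by
                  rw [hvD]; rw [if_neg (by omega)]
                rwa [hppv] at this
              · rw [if_neg hq2]
                exact hA.1 i hi0 (by omega) hip
        · intro hpp0 i hiv hq
          have hilen : i < n := by rw [hv'] at hiv; simp [hlen'] at hiv; omega
          have higt : pp < i := by omega
          have hgp : (pp - 1) / 2 ≠ pp := by omega
          have hgp2 : (pp - 1) / 2 ≠ pos := by omega
          rw [hv'D, hv'D, if_neg hgp, if_neg hgp2]
          have hEpp := hA.1 pp hpp0 (by omega) (by omega)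
          unfold Edge at hEpp
          have hppv : v.getD pp 0 = parent := by rw [hvD]; rw [if_neg (by omega)]
          rw [hppv] at hEpp
          rw [if_neg (by omega)]
          by_cases hip : i = pos
          · rw [if_pos hip]
            exact hEpp
          · rw [if_neg hip]
            have hEi := hA.1 i (by omega) (by omega) hip
            unfold Edge at hEi
            rw [hq, hppv] at hEi
            exact le_trans hEpp hEi
      obtain ⟨hperm, hheap⟩ := ih pp hpplt l' (by omega) (by rw [← hv']; exact hAup)
      refine ⟨?_, hheap⟩
      have hswap : v' = (v.set pos (v.getD pp 0)).set pp (v.getD pos 0) := by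
        have h1 : v.getD pp 0 = parent := by rw [hvD]; rw [if_neg (by omega)]
        have h2 : v.getD pos 0 = x := by rw [hvD]; rw [if_pos ⟨rfl, hpos⟩]
        rw [h1, h2, hv', hl', hv, List.set_set]
      have hpermv : v'.Perm v := by
        rw [hswap, List.getD_eq_getElem v 0 (by omega), List.getD_eq_getElem v 0 (by omega)]
        exact List.set_set_perm (by omega) (by omega)
      rw [← hv'] at hperm
      exact hperm.trans hpermv
    · rw [if_neg hxp]
      refine ⟨List.Perm.refl _, ?_⟩
      intro i hi0 hiv
      have hilen : i < n := by simpa [← hn] using hiv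
      by_cases hip : i = pos
      · subst hip
        unfold Edge
        rw [← hv, hvD, hvD, if_neg (by omega), if_pos ⟨rfl, hilen⟩]
        exact le_of_not_gt hxp
      · exact hA.1 i hi0 (by simpa [hvlen] using hilen) hip
  · rw [dif_neg h0]
    refine ⟨List.Perm.refl _, ?_⟩
    intro i hi0 hiv
    have hilen : i < n := by simpa [← hn] using hiv
    exact hA.1 i hi0 (by simpa [hvlen] using hilen) (by omega)

def ADown (v : List Int) (pos : Nat) : Prop :=
  (∀ i, 0 < i → i < v.length → i ≠ pos → (i - 1) / 2 ≠ pos → Edge v i) ∧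
  (0 < pos → ∀ i, i < v.length → (i - 1) / 2 = pos → v.getD ((pos - 1) / 2) 0 ≤ v.getD i 0)

theorem step_perm (l : List Int) (x : Int) (pos c : Nat) (hpos : pos < l.length)
    (hclen : c < l.length) (hne : pos ≠ c) :
    ((l.set pos (l.getD c 0)).set c x).Perm (l.set pos x) := by
  have hlen : (l.set pos x).length = l.length := by simp
  have hthis := List.set_set_perm (show pos < (l.set pos x).length by simp; omega)
    (show c < (l.set pos x).length by simp; omega)
  have e1 : (l.set pos x)[c]'(by omega) = l.getD c 0 := by
    rw [← List.getD_eq_getElem _ 0, getD_set', if_neg (by omega)]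
  have e2 : (l.set pos x)[pos]'(by omega) = x := by
    rw [← List.getD_eq_getElem _ 0, getD_set', if_pos ⟨rfl, hpos⟩]
  rw [e1, e2, List.set_set] at hthis
  exact hthis

theorem walk_step (x : Int) (l : List Int) (pos c : Nat) (hpos : pos < l.length)
    (hcc : c = 2 * pos + 1 ∨ c = 2 * pos + 2) (hclen : c < l.length)
    (hmin : ∀ i, 0 < i → (i - 1) / 2 = pos → i < l.length → i ≠ c → l.getD c 0 ≤ l.getD i 0)
    (hA : ADown (l.set pos x) pos) :
    ADown ((l.set pos (l.getD c 0)).set c x) c := by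
  set n := l.length with hn
  have hcp : pos < c := by omega
  have hcpar : (c - 1) / 2 = pos := by omega
  have hvD : ∀ j, (l.set pos x).getD j 0 = if pos = j ∧ j < n then x else l.getD j 0 :=
    fun j => getD_set' l pos j x
  have hv'D : ∀ j, ((l.set pos (l.getD c 0)).set c x).getD j 0 =
      if j = c then x else if j = pos then l.getD c 0 else l.getD j 0 := by
    intro j
    rw [getD_set', getD_set']
    simp only [List.length_set, ← hn]
    split_ifs <;> first | rfl | omega
  have hA1 : ∀ i, 0 < i → i < n → i ≠ pos → (i - 1) / 2 ≠ pos →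
      l.getD ((i - 1) / 2) 0 ≤ l.getD i 0 := by
    intro i h0 hiln hne hq
    have := hA.1 i h0 (by simpa [← hn] using hiln) hne hq
    unfold Edge at this
    rwa [hvD, hvD, if_neg (by omega), if_neg (by omega)] at this
  have hA2 : 0 < pos → ∀ i, i < n → (i - 1) / 2 = pos →
      l.getD ((pos - 1) / 2) 0 ≤ l.getD i 0 := by
    intro h0 i hiln hq
    have := hA.2 h0 i (by simpa [← hn] using hiln) hq
    rwa [hvD, hvD, if_neg (by omega), if_neg (by omega)] at this
  have hlen2 : ((l.set pos (l.getD c 0)).set c x).length = n := by simp [← hn]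
  constructor
  · intro i hi0 hiv hinec hq
    have hiln : i < n := by rwa [hlen2] at hiv
    unfold Edge
    rw [hv'D, hv'D, if_neg hinec, if_neg hq]
    by_cases hip : i = pos
    · subst hip
      rw [if_pos rfl, if_neg (by omega)]
      exact hA2 (by omega) c hclen hcpar
    · rw [if_neg hip]
      by_cases hqpos : (i - 1) / 2 = pos
      · rw [if_pos hqpos]
        exact hmin i hi0 hqpos hiln hinec
      · rw [if_neg hqpos]
        exact hA1 i hi0 hiln hip hqpos
  · intro _ i hiv hq
    have hiln : i < n := by rwa [hlen2] at hiv
    have hig : c < i := by omega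
    rw [hv'D, hv'D, hcpar, if_neg (by omega), if_pos rfl, if_neg (by omega), if_neg (by omega)]
    have := hA1 i (by omega) hiln (by omega) (by omega)
    rwa [hq] at this

theorem walk_spec (l : List Int) (pos : Nat) (x : Int) (hpos : pos < l.length)
    (hA : ADown (l.set pos x) pos) :
    (pySiftupWalk l pos).2 < (pySiftupWalk l pos).1.length ∧
    (pySiftupWalk l pos).1.length = l.length ∧
    ((pySiftupWalk l pos).1.set (pySiftupWalk l pos).2 x).Perm (l.set pos x) ∧
    AUp ((pySiftupWalk l pos).1.set (pySiftupWalk l pos).2 x) (pySiftupWalk l pos).2 := by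
  generalize hfuel : l.length - pos = fuel
  induction fuel using Nat.strong_induction_on generalizing l pos with
  | _ fuel ih =>
  rw [pySiftupWalk]
  by_cases hch : 2 * pos + 1 < l.length
  · rw [dif_pos hch]
    by_cases hcond : 2 * pos + 1 + 1 < l.length ∧ ¬ (l.getD (2 * pos + 1) 0 < l.getD (2 * pos + 1 + 1) 0)
    · rw [if_pos hcond]
      have hclen : 2 * pos + 2 < l.length := by omega
      have hmin : ∀ i, 0 < i → (i - 1) / 2 = pos → i < l.length → i ≠ 2 * pos + 1 + 1 →
          l.getD (2 * pos + 1 + 1) 0 ≤ l.getD i 0 := by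
        intro i hi0 hip hiln hinec
        have : i = 2 * pos + 1 := by omega
        subst this
        exact not_lt.mp hcond.2
      have hAd := walk_step x l pos (2 * pos + 1 + 1) hpos (by omega) (by omega) hmin hA
      obtain ⟨g1, g2, g3, g4⟩ := ih ((l.set pos (l.getD (2 * pos + 1 + 1) 0)).length - (2 * pos + 1 + 1))
        (by simp; omega) _ _ (by simp; omega) hAd rfl
      refine ⟨g1, by rw [g2]; simp, ?_, g4⟩
      exact g3.trans (step_perm l x pos (2 * pos + 1 + 1) hpos (by omega) (by omega))
    · rw [if_neg hcond]
      have hmin : ∀ i, 0 < i → (i - 1) / 2 = pos → i < l.length → i ≠ 2 * pos + 1 →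
          l.getD (2 * pos + 1) 0 ≤ l.getD i 0 := by
        intro i hi0 hip hiln hinec
        have hie : i = 2 * pos + 2 := by omega
        subst hie
        have hlt : l.getD (2 * pos + 1) 0 < l.getD (2 * pos + 1 + 1) 0 := by
          by_contra hno
          have h2 : 2 * pos + 1 + 1 < l.length := by omega
          exact hcond ⟨h2, hno⟩
        exact le_of_lt hlt
      have hAd := walk_step x l pos (2 * pos + 1) hpos (by omega) (by omega) hmin hA
      obtain ⟨g1, g2, g3, g4⟩ := ih ((l.set pos (l.getD (2 * pos + 1) 0)).length - (2 * pos + 1))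
        (by simp; omega) _ _ (by simp; omega) hAd rfl
      refine ⟨g1, by rw [g2]; simp, ?_, g4⟩
      exact g3.trans (step_perm l x pos (2 * pos + 1) hpos (by omega) (by omega))
  · rw [dif_neg hch]
    refine ⟨hpos, rfl, List.Perm.refl _, ?_, ?_⟩
    · intro i hi0 hiv hine
      exact hA.1 i hi0 hiv hine (by simp at hiv; omega)
    · intro h0 i hiv hq
      simp at hiv
      omega

theorem getD_append_lt (l l2 : List Int) (j : Nat) (hj : j < l.length) :
    (l ++ l2).getD j 0 = l.getD j 0 := by
  rw [List.getD_eq_getElem _ 0 (by simp; omega), List.getD_eq_getElem _ 0 hj]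
  exact List.getElem_append_left hj

theorem push_spec (l : List Int) (x : Int) (hl : IsHeap l) :
    (pyHeappush l x).Perm (x :: l) ∧ IsHeap (pyHeappush l x) := by
  have hset : (l ++ [x]).set l.length x = l ++ [x] := by
    apply List.ext_getElem (by simp)
    intro i h1 h2
    simp only [List.getElem_set]
    split_ifs with h
    · subst h; simp
    · rfl
  have hA : AUp ((l ++ [x]).set l.length x) l.length := by
    rw [hset]
    constructor
    · intro i hi0 hiv hne
      have hil : i < l.length := by simp at hiv; omega
      unfold Edge
      rw [getD_append_lt l [x] i hil, getD_append_lt l [x] _ (by omega)]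
      exact hl i hi0 hil
    · intro h0 i hiv hq
      simp at hiv
      omega
  obtain ⟨hperm, hheap⟩ := siftdown_spec l.length (l ++ [x]) x (by simp) hA
  rw [hset] at hperm
  exact ⟨hperm.trans (List.perm_append_singleton x l), hheap⟩

theorem pop_spec (l : List Int) (hl : IsHeap l) (hne : l ≠ []) :
    (l.getD 0 0 :: pyHeappop l).Perm l ∧ IsHeap (pyHeappop l) := by
  obtain ⟨rest, last, rfl⟩ : ∃ r a, l = r ++ [a] := by
    refine ⟨l.dropLast, l.getLast hne, ?_⟩
    exact (List.dropLast_append_getLast hne).symm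
  have hlast : (rest ++ [last]).getLastD 0 = last := by
    simp [List.getLastD_eq_getLast?, List.getLast?_append]
  have hdrop : (rest ++ [last]).dropLast = rest := by simp
  rw [pyHeappop]
  simp only [hlast, hdrop]
  by_cases hrest : rest.isEmpty
  · rw [if_pos hrest]
    have : rest = [] := List.isEmpty_iff.mp hrest
    subst this
    refine ⟨by simp, ?_⟩
    intro i h1 h2
    simp at h2
  · rw [if_neg hrest]
    have hrne : rest ≠ [] := fun h => by simp [h] at hrest
    have hrlen : 0 < rest.length := List.length_pos_iff.mpr hrne
    have hlget : ∀ j, j < rest.length → (rest ++ [last]).getD j 0 = rest.getD j 0 :=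
      fun j hj => getD_append_lt rest [last] j hj
    have hAd : ADown (rest.set 0 last) 0 := by
      constructor
      · intro i hi0 hiv hine hq
        have hil : i < rest.length := by simpa using hiv
        unfold Edge
        rw [getD_set', getD_set', if_neg (by omega), if_neg (by omega)]
        have := hl i hi0 (by simp; omega)
        unfold Edge at this
        rw [hlget i hil, hlget _ (by omega)] at this
        exact this
      · intro h0; omega
    have hAd' : ADown ((rest.set 0 last).set 0 last) 0 := by
      rwa [List.set_set]
    obtain ⟨g1, g2, g3, g4⟩ := walk_spec (rest.set 0 last) 0 last (by simp; omega) hAd'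
    obtain ⟨hp2, hh2⟩ := siftdown_spec (pySiftupWalk (rest.set 0 last) 0).2
      (pySiftupWalk (rest.set 0 last) 0).1 last (by omega) g4
    refine ⟨?_, hh2⟩
    rw [List.set_set] at g3
    have hperm : (pySiftdown (pySiftupWalk (rest.set 0 last) 0).1 last
        (pySiftupWalk (rest.set 0 last) 0).2).Perm (rest.set 0 last) := hp2.trans g3
    obtain ⟨a, t, rfl⟩ : ∃ a t, rest = a :: t := by
      cases rest with
      | nil => exact absurd rfl hrne
      | cons a t => exact ⟨a, t, rfl⟩
    have hhead : ((a :: t) ++ [last]).getD 0 0 = a := by simp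
    rw [hhead]
    have hperm2 : ((a :: t).set 0 last).Perm (last :: t) := by
      simp
    refine ((hperm.trans hperm2).cons a).trans ?_
    exact List.Perm.cons a (List.perm_append_singleton last t).symm


theorem heap_head_le (v : List Int) (hv : IsHeap v) : ∀ i, i < v.length → v.getD 0 0 ≤ v.getD i 0 := by
  intro i
  induction i using Nat.strong_induction_on with
  | _ i ih =>
    intro hi
    rcases Nat.eq_zero_or_pos i with h0 | h0
    · subst h0; exact le_refl _
    · have hp := hv i h0 hi
      have := ih ((i - 1) / 2) (by omega) (by omega)
      exact le_trans this hp

theorem heap_head_min (v : List Int) (hv : IsHeap v) : ∀ x ∈ v, v.getD 0 0 ≤ x := by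
  intro x hx
  obtain ⟨i, hi, rfl⟩ := List.getElem_of_mem hx
  have := heap_head_le v hv i hi
  rwa [List.getD_eq_getElem v 0 hi] at this

theorem sorted_head_min (t : List Int) (ht : t.Pairwise (· ≤ ·)) : ∀ x ∈ t, t.getD 0 0 ≤ x := by
  cases t with
  | nil => intro x hx; simp at hx
  | cons a t' =>
    intro x hx
    rcases List.mem_cons.1 hx with rfl | hx
    · exact le_refl _
    · exact (List.pairwise_cons.1 ht).1 x hx

theorem head_eq_of_perm (h t : List Int) (hp : h.Perm t) (hne : h ≠ [])
    (h1 : ∀ x ∈ h, h.getD 0 0 ≤ x) (h2 : ∀ x ∈ t, t.getD 0 0 ≤ x) :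
    h.getD 0 0 = t.getD 0 0 := by
  have htne : t ≠ [] := by intro h0; subst h0; exact hne hp.eq_nil
  have hh : h.getD 0 0 ∈ h := by cases h with | nil => exact absurd rfl hne | cons a l => simp
  have ht' : t.getD 0 0 ∈ t := by cases t with | nil => exact absurd rfl htne | cons a l => simp
  exact le_antisymm (h1 _ (hp.symm.mem_iff.1 ht')) (h2 _ (hp.mem_iff.1 hh))

theorem pairwise_getD_le (top : List Int) (hs : top.Pairwise (· ≤ ·)) (i j : Nat)
    (hij : i ≤ j) (hj : j < top.length) : top.getD i 0 ≤ top.getD j 0 := by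
  rcases Nat.eq_or_lt_of_le hij with rfl | hlt
  · exact le_refl _
  · rw [List.getD_eq_getElem top 0 (by omega), List.getD_eq_getElem top 0 hj]
    exact List.pairwise_iff_getElem.1 hs i j (by omega) hj hlt

theorem bsLeft_spec (top : List Int) (s : Int) (hs : top.Pairwise (· ≤ ·)) (lo hi : Nat)
    (hlh : lo ≤ hi) (hhi : hi ≤ top.length) (hlo : ∀ j, j < lo → top.getD j 0 < s)
    (hge : ∀ j, hi ≤ j → j < top.length → s ≤ top.getD j 0) :
    bsLeft top s lo hi ≤ top.length ∧
    (∀ j, j < bsLeft top s lo hi → top.getD j 0 < s) ∧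
    (∀ j, bsLeft top s lo hi ≤ j → j < top.length → s ≤ top.getD j 0) := by
  by_cases h : lo < hi
  · rw [bsLeft]
    simp only [dif_pos h]
    by_cases hm : top.getD ((lo + hi) / 2) 0 < s
    · rw [if_pos hm]
      exact bsLeft_spec top s hs ((lo + hi) / 2 + 1) hi (by omega) hhi
        (fun j hj => lt_of_le_of_lt (pairwise_getD_le top hs j ((lo+hi)/2) (by omega) (by omega)) hm) hge
    · rw [if_neg hm]
      exact bsLeft_spec top s hs lo ((lo + hi) / 2) (by omega) (by omega) hlo
        (fun j hj hj' => le_trans (le_of_not_gt (by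
          intro hc
          exact hm (lt_of_le_of_lt (pairwise_getD_le top hs ((lo+hi)/2) j hj hj') hc ) ))
          (le_refl _))
  · rw [bsLeft]
    simp only [dif_neg h]
    exact ⟨by omega, hlo, fun j hj hj' => hge j (by omega) hj'⟩
termination_by hi - lo
decreasing_by all_goals omega


theorem insertIdx_eq_take_drop (l : List Int) (i : Nat) (a : Int) (h : i ≤ l.length) :
    l.insertIdx i a = l.take i ++ a :: l.drop i := by
  induction l generalizing i with
  | nil => simp at h; subst h; simp
  | cons b t ih =>
    cases i with
    | zero => simp
    | succ n => simp_all [List.insertIdx_succ_cons]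

theorem mem_take_getD (l : List Int) (p : Nat) (x : Int) (hx : x ∈ l.take p) :
    ∃ j, j < p ∧ j < l.length ∧ x = l.getD j 0 := by
  obtain ⟨j, hj, rfl⟩ := List.getElem_of_mem hx
  refine ⟨j, ?_, ?_, ?_⟩
  · have := List.length_take (l := l) (i := p); omega
  · have := List.length_take (l := l) (i := p); omega
  · rw [List.getElem_take, List.getD_eq_getElem]

theorem mem_drop_getD (l : List Int) (p : Nat) (x : Int) (hx : x ∈ l.drop p) :
    ∃ j, p ≤ j ∧ j < l.length ∧ x = l.getD j 0 := by
  obtain ⟨j, hj, rfl⟩ := List.getElem_of_mem hx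
  have hl := List.length_drop (l := l) (i := p)
  refine ⟨p + j, by omega, by omega, ?_⟩
  rw [List.getD_eq_getElem l 0 (by omega)]
  exact (List.getElem_drop (h := by omega)).symm ▸ rfl

theorem insert_spec (top : List Int) (s : Int) (hs : top.Pairwise (· ≤ ·)) :
    (top.insertIdx (bsLeft top s 0 top.length) s).Pairwise (· ≤ ·) ∧
    (top.insertIdx (bsLeft top s 0 top.length) s).Perm (s :: top) := by
  obtain ⟨hle, hlt, hge⟩ := bsLeft_spec top s hs 0 top.length (by omega) (le_refl _)
    (by omega) (by omega)
  set p := bsLeft top s 0 top.length with hp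
  constructor
  · rw [insertIdx_eq_take_drop top p s hle]
    rw [List.pairwise_append]
    refine ⟨hs.sublist (List.take_sublist _ _), ?_, ?_⟩
    · rw [List.pairwise_cons]
      refine ⟨?_, hs.sublist (List.drop_sublist _ _)⟩
      intro y hy
      obtain ⟨j, hj1, hj2, rfl⟩ := mem_drop_getD top p y hy
      exact hge j hj1 hj2
    · intro x hx y hy
      obtain ⟨j, hj1, hj2, rfl⟩ := mem_take_getD top p x hx
      rcases List.mem_cons.1 hy with rfl | hy
      · exact le_of_lt (hlt j hj1)
      · obtain ⟨j2, hj21, hj22, rfl⟩ := mem_drop_getD top p y hy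
        exact le_trans (le_of_lt (hlt j hj1)) (hge j2 hj21 hj22)
  · exact List.perm_insertIdx s top hle


theorem loop_eq (k : Int) (hk : 1 ≤ k) (score : List Int) :
    ∀ (rest : List Int) (i : Nat) (heap top ans : List Int),
      score.drop i = rest → heap.Perm top → IsHeap heap → top.Pairwise (· ≤ ·) →
      (heap.length : Int) = min (i : Int) k →
      solGo k score i heap ans = (rest.foldl (altStep k) (top, ans)).2 := by
  intro rest
  induction rest with
  | nil =>
    intro i heap top ans hdrop hperm hheap hsort hlen
    have hle : score.length ≤ i := by
      by_contra hlt
      have := congrArg List.length hdrop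
      simp at this
      omega
    rw [solGo, dif_neg (by omega)]
    simp
  | cons s rest' ih =>
    intro i heap top ans hdrop hperm hheap hsort hlen
    have hlt : i < score.length := by
      by_contra hge
      rw [List.drop_eq_nil_of_le (by omega)] at hdrop
      exact (List.cons_ne_nil s rest') hdrop.symm
    have hgetd : score.getD i 0 = s := by
      have h0 : (score.drop i).getD 0 0 = s := by rw [hdrop]; rfl
      rw [List.getD_eq_getElem _ 0 (by simp; omega), List.getElem_drop] at h0
      rw [List.getD_eq_getElem _ 0 hlt]
      simpa using h0
    have hdrop1 : score.drop (i + 1) = rest' := by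
      have : score.drop (i + 1) = (score.drop i).drop 1 := by
        rw [List.drop_drop]
      rw [this, hdrop]
      rfl
    have htoplen : top.length = heap.length := hperm.length_eq.symm
    -- B's step data
    obtain ⟨hs1, hs2⟩ := insert_spec top s hsort
    set t1 := top.insertIdx (bsLeft top s 0 top.length) s with ht1
    have ht1len : t1.length = top.length + 1 := by
      have := hs2.length_eq
      simpa using this
    have hfold : ((s :: rest').foldl (altStep k) (top, ans)).2 =
        (rest'.foldl (altStep k) (altStep k (top, ans) s)).2 := by rfl
    rw [hfold]
    have haltstep : altStep k (top, ans) s =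
        (if (t1.length : Int) > k then t1.drop 1 else t1,
         ans ++ [(if (t1.length : Int) > k then t1.drop 1 else t1).getD 0 0]) := by
      rfl
    rw [solGo, dif_pos hlt]
    simp only [hgetd]
    by_cases hik : (i : Int) < k
    · rw [if_pos hik]
      obtain ⟨hp, hh⟩ := push_spec heap s hheap
      have hplen : (pyHeappush heap s).length = heap.length + 1 := by
        simpa using hp.length_eq
      have hnotrim : ¬ ((t1.length : Int) > k) := by
        rw [ht1len, htoplen]
        push_cast
        omega
      rw [haltstep, if_neg hnotrim]
      have hperm' : (pyHeappush heap s).Perm t1 := hp.trans ((hperm.cons s).trans hs2.symm)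
      have hne' : pyHeappush heap s ≠ [] := by
        intro h0
        rw [h0] at hplen
        simp at hplen
      have hhead : (pyHeappush heap s).getD 0 0 = t1.getD 0 0 :=
        head_eq_of_perm _ _ hperm' hne' (heap_head_min _ hh) (sorted_head_min _ hs1)
      rw [hhead]
      exact ih (i + 1) (pyHeappush heap s) t1 _ hdrop1 hperm' hh hs1
        (by rw [hplen]; push_cast [hlen]; omega)
    · rw [if_neg hik]
      have hklen : (heap.length : Int) = k := by rw [hlen]; omega
      have hne : heap ≠ [] := by
        intro h0
        rw [h0] at hklen
        simp at hklen
        omega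
      have htrim : (t1.length : Int) > k := by
        rw [ht1len, htoplen]
        push_cast
        omega
      rw [haltstep, if_pos htrim]
      obtain ⟨b, t1', hbt⟩ : ∃ b t1', t1 = b :: t1' := by
        cases ht : t1 with
        | nil => rw [ht] at ht1len; simp at ht1len
        | cons b t1' => exact ⟨b, t1', rfl⟩
      have hdrop1' : t1.drop 1 = t1' := by rw [hbt]; rfl
      have hbmin : ∀ x ∈ t1, b ≤ x := by
        have := sorted_head_min t1 hs1
        rw [hbt] at this ⊢
        simpa using this
      have hbmem : b ∈ s :: top := hs2.subset (by rw [hbt]; simp)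
      have ht1'sort : t1'.Pairwise (· ≤ ·) := by
        rw [hbt] at hs1
        exact (List.pairwise_cons.1 hs1).2
      have hmem_t1 : ∀ x ∈ s :: top, x ∈ t1 := fun x hx => hs2.symm.subset hx
      have hheapmin := heap_head_min heap hheap
      have hminmem : heap.getD 0 0 ∈ heap := by
        cases heap with
        | nil => exact absurd rfl hne
        | cons a l => simp
      by_cases hbr : heap.getD 0 0 < s
      · rw [if_pos hbr]
        obtain ⟨hpop, hph⟩ := pop_spec heap hheap hne
        obtain ⟨hp, hh⟩ := push_spec (pyHeappop heap) s hph
        have hbeq : b = heap.getD 0 0 := by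
          refine le_antisymm ?_ ?_
          · exact hbmin _ (hmem_t1 _ (List.mem_cons_of_mem s (hperm.subset hminmem)))
          · rcases List.mem_cons.1 hbmem with rfl | hb
            · exact le_of_lt hbr
            · exact hheapmin b (hperm.symm.subset hb)
        have hchain : (b :: t1').Perm (b :: (s :: pyHeappop heap)) := by
          rw [← hbt]
          refine hs2.trans ?_
          refine (List.Perm.cons s (hperm.symm.trans hpop.symm)).trans ?_
          rw [hbeq]
          exact List.Perm.swap _ _ _
        have hperm' : (pyHeappush (pyHeappop heap) s).Perm t1' :=
          hp.trans (hchain.cons_inv).symm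
        have hpoplen : (pyHeappop heap).length + 1 = heap.length := by
          simpa using hpop.length_eq
        have hplen : (pyHeappush (pyHeappop heap) s).length = heap.length := by
          have := hp.length_eq
          simp at this
          omega
        have hne' : pyHeappush (pyHeappop heap) s ≠ [] := by
          intro h0
          rw [h0] at hplen
          simp at hplen
          omega
        have hhead : (pyHeappush (pyHeappop heap) s).getD 0 0 = t1'.getD 0 0 :=
          head_eq_of_perm _ _ hperm' hne' (heap_head_min _ hh) (sorted_head_min _ ht1'sort)
        rw [hdrop1', hhead]
        exact ih (i + 1) _ t1' _ hdrop1 hperm' hh ht1'sort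
          (by rw [hplen]; push_cast [hklen]; omega)
      · rw [if_neg hbr]
        have hbeq : b = s := by
          refine le_antisymm (hbmin _ (hmem_t1 _ (by simp))) ?_
          rcases List.mem_cons.1 hbmem with rfl | hb
          · exact le_refl _
          · exact le_trans (not_lt.mp hbr) (hheapmin b (hperm.symm.subset hb))
        have hperm' : heap.Perm t1' := by
          refine hperm.trans ?_
          have : (s :: t1').Perm (s :: top) := by
            have hbt' : t1 = s :: t1' := by rw [hbt, hbeq]
            rw [← hbt']
            exact hs2
          exact (this.cons_inv).symm
        have hhead : heap.getD 0 0 = t1'.getD 0 0 :=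
          head_eq_of_perm _ _ hperm' hne (heap_head_min _ hheap) (sorted_head_min _ ht1'sort)
        rw [hdrop1', hhead]
        exact ih (i + 1) heap t1' _ hdrop1 hperm' hheap ht1'sort
          (by push_cast [hklen]; omega)

-- ===== VERDICT (by name: the statement is the Claim_ definition above) =====
theorem solution_spec : Claim_equal_solution := by
  intro k score _ hpre
  unfold Spec_solution solution solution_alt
  exact loop_eq k hpre.1 score score 0 [] [] [] (by simp) (List.Perm.refl _)
    (fun i h1 h2 => absurd h2 (by simp)) List.Pairwise.nil (by have := hpre.1; simp; omega)
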